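-- pv_equiv track=rewrite | github.com/HenriquePD123/desenvolve-python-basico | python modulo 6/6.3/aula3_questao3.py | encontrar_intervalo_max_negativos
-- ===== SOURCE A (Python) =====
-- def encontrar_intervalo_max_negativos(lista):
--     """Encontra o intervalo com a maior quantidade de números negativos na lista."""
--     max_negativos = 0
--     intervalo_max_neg = (0, 0)
--
--     n = len(lista)
--     for i in range(n):
--         negativos = 0
--         for j in range(i, n):
--             if lista[j] < 0:
--                 negativos += 1
--             if negativos > max_negativos:
--                 max_negativos = negativos
--                 intervalo_max_neg = (i, j)
--
--     return intervalo_max_neg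
-- ===== SOURCE B (Python) =====
-- def encontrar_intervalo_max_negativos(lista):
--     """Encontra o intervalo com a maior quantidade de números negativos na lista.
--
--     Single pass: the interval with the most negatives always starts at index zero
--     and ends at the last negative index (degenerate if there is no negative)."""
--     last = None
--     for idx, x in enumerate(lista):
--         if x < 0:
--             last = idx
--     return (0, last) if last is not None else (0, 0)
-- ===== Notes on version B (the rewrite author's own statement) =====
-- stated objective: faster
-- what changed: Replaced the quadratic nested scan over all intervals by a single pass that records the index of the last negative element, since the optimal interval always starts at index zero and ends at the last negative index (degenerate when there is no negative).
import Mathlib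
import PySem

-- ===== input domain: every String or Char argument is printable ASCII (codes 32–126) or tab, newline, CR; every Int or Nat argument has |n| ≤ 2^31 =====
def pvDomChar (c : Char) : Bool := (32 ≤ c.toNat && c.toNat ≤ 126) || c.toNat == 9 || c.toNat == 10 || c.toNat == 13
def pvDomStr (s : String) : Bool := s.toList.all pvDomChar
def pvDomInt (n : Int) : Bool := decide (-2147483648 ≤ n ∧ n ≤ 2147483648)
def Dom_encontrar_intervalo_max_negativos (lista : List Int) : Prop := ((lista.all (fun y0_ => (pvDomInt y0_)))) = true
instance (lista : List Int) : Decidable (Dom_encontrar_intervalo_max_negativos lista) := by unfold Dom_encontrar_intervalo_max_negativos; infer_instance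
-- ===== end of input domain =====

-- B replaces A's quadratic scan over all intervals by a single pass recording the last
-- negative index: the interval starts at index zero and ends at the last negative index
-- (and is degenerate when the list has no negative element).

-- ===== PORT A =====
def encontrar_intervalo_max_negativos (lista : List Int) : List Int :=
  let n : Int := lista.length
  let res : Int × Int × Int := (PySem.List.pyRange 0 n 1).foldl
    (fun st i =>
      let r := (PySem.List.pyRange i n 1).foldl
        (fun (s : Int × Int × Int × Int) j =>
          let neg := if PySem.List.pyGetD lista j 0 < 0 then s.1 + 1 else s.1
          if neg > s.2.1 then (neg, neg, i, j) else (neg, s.2))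
        (0, st)
      r.2)
    (0, 0, 0)
  [res.2.1, res.2.2]

-- ===== PORT B =====
def encontrar_intervalo_max_negativos_alt (lista : List Int) : List Int :=
  let last := (PySem.List.enumerate lista 0).foldl
    (fun (acc : Option Int) p => if p.2 < 0 then some p.1 else acc) none
  match last with
  | some j => [0, j]
  | none => [0, 0]

-- ===== PRECONDITION & SPEC =====
def Spec_encontrar_intervalo_max_negativos (lista : List Int) (out : List Int) : Prop := out = encontrar_intervalo_max_negativos_alt lista
instance (lista : List Int) (out : List Int) : Decidable (Spec_encontrar_intervalo_max_negativos lista out) := by unfold Spec_encontrar_intervalo_max_negativos; infer_instance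

-- ===== CLAIM (what is proved, stated in full; the proofs are below) =====
def Claim_equal_encontrar_intervalo_max_negativos : Prop := ∀ (lista : List Int), Dom_encontrar_intervalo_max_negativos lista → Spec_encontrar_intervalo_max_negativos lista (encontrar_intervalo_max_negativos lista)

-- ===== LEMMAS AND PROOFS =====

-- A's inner-loop step, on (index, value) pairs
def pvStep (i : Int) (s : Int × Int × Int × Int) (p : Int × Int) : Int × Int × Int × Int :=
  let neg := if p.2 < 0 then s.1 + 1 else s.1
  if neg > s.2.1 then (neg, neg, i, p.1) else (neg, s.2)

def pvCnt (L : List (Int × Int)) : Int := (L.countP (fun p => decide (p.2 < 0)) : Nat)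

def pvLastNeg (L : List (Int × Int)) : Int :=
  L.foldl (fun a p => if p.2 < 0 then p.1 else a) 0

theorem pvCnt_append (L M : List (Int × Int)) : pvCnt (L ++ M) = pvCnt L + pvCnt M := by
  simp [pvCnt, List.countP_append]

theorem pvCnt_nonneg (L : List (Int × Int)) : 0 ≤ pvCnt L := by
  simp [pvCnt]

theorem pvCnt_drop_le (L : List (Int × Int)) (k : Nat) : pvCnt (L.drop k) ≤ pvCnt L := by
  conv_rhs => rw [← List.take_append_drop k L]
  rw [pvCnt_append]
  have := pvCnt_nonneg (L.take k)
  omega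

theorem inner_char (i : Int) (L : List (Int × Int)) (v M a b : Int) (h : v ≤ M) :
    L.foldl (pvStep i) (v, M, a, b) =
      (v + pvCnt L, if M < v + pvCnt L then (v + pvCnt L, i, pvLastNeg L) else (M, a, b)) := by
  induction L using List.reverseRecOn with
  | nil => simp [pvCnt, pvLastNeg]; omega
  | append_singleton L p ih =>
    rw [List.foldl_append, ih, pvCnt_append]
    have hLn : pvLastNeg (L ++ [p]) = if p.2 < 0 then p.1 else pvLastNeg L := by
      simp [pvLastNeg, List.foldl_append]
    by_cases hp : p.2 < 0
    · simp only [List.foldl_cons, List.foldl_nil, pvStep, hLn, if_pos hp]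
      have hc : pvCnt [p] = 1 := by simp [pvCnt, hp]
      rw [hc]
      split_ifs with h1 h2 h3 h4 <;> simp_all <;> try omega
    · simp only [List.foldl_cons, List.foldl_nil, pvStep, hLn, if_neg hp]
      have hc : pvCnt [p] = 0 := by simp [pvCnt, hp]
      rw [hc]
      split_ifs with h1 h2 h3 h4 <;> simp_all <;> try omega

theorem outer_const (E : List (Int × Int)) (is : List Int) (M a b : Int)
    (hM : 0 ≤ M) (h : ∀ i ∈ is, pvCnt (E.drop i.toNat) ≤ M) :
    is.foldl (fun st i => ((E.drop i.toNat).foldl (pvStep i) (0, st)).2) (M, a, b) = (M, a, b) := by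
  induction is with
  | nil => rfl
  | cons i is ih =>
    simp only [List.foldl_cons]
    rw [inner_char i _ 0 M a b hM]
    have hi := h i (by simp)
    rw [if_neg (by omega)]
    exact ih (fun j hj => h j (by simp [hj]))

-- B's fold characterised by pvCnt / pvLastNeg
theorem bfold_char (L : List (Int × Int)) :
    L.foldl (fun (acc : Option Int) p => if p.2 < 0 then some p.1 else acc) none =
      if 0 < pvCnt L then some (pvLastNeg L) else none := by
  induction L using List.reverseRecOn with
  | nil => simp [pvCnt]
  | append_singleton L p ih =>
    rw [List.foldl_append, ih, pvCnt_append]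
    have hLn : pvLastNeg (L ++ [p]) = if p.2 < 0 then p.1 else pvLastNeg L := by
      simp [pvLastNeg, List.foldl_append]
    by_cases hp : p.2 < 0
    · have hc : pvCnt [p] = 1 := by simp [pvCnt, hp]
      have := pvCnt_nonneg L
      simp only [List.foldl_cons, List.foldl_nil, if_pos hp, hLn, hc]
      rw [if_pos (by omega)]
    · have hc : pvCnt [p] = 0 := by simp [pvCnt, hp]
      simp [hp, hLn, hc]

-- A's inner loop over pyRange i n 1 equals the pvStep fold over (enumerate lista 0).drop i.toNat
theorem inner_eq_drop (lista : List Int) (i : Int) (hi0 : 0 ≤ i) (hin : i ≤ (lista.length : Int))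
    (st : Int × Int × Int) :
    (PySem.List.pyRange i (lista.length : Int) 1).foldl
        (fun (s : Int × Int × Int × Int) j =>
          let neg := if PySem.List.pyGetD lista j 0 < 0 then s.1 + 1 else s.1
          if neg > s.2.1 then (neg, neg, i, j) else (neg, s.2))
        (0, st) =
      ((PySem.List.enumerate lista 0).drop i.toNat).foldl (pvStep i) (0, st) := by
  have hE : PySem.List.enumerate lista 0 =
      (PySem.List.pyRange 0 (lista.length : Int) 1).map (fun j => (j, PySem.List.pyGetD lista j 0)) := by
    simpa using PySem.List.enumerate_eq_map_pyRange lista 0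
  have hsplit : PySem.List.pyRange 0 (lista.length : Int) 1 =
      PySem.List.pyRange 0 i 1 ++ PySem.List.pyRange i (lista.length : Int) 1 :=
    PySem.List.pyRange_one_append 0 i _ hi0 hin
  have hlen : (PySem.List.pyRange 0 i 1).length = i.toNat := by
    rw [PySem.List.length_pyRange_one]; omega
  have hlen' : ((PySem.List.pyRange 0 i 1).map (fun j => (j, PySem.List.pyGetD lista j 0))).length = i.toNat := by
    simp [hlen]
  rw [hE, hsplit, List.map_append, List.drop_left' hlen', List.foldl_map]
  rfl

-- ===== VERDICT (by name: the statement is the Claim_ definition above) =====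
theorem encontrar_intervalo_max_negativos_spec : Claim_equal_encontrar_intervalo_max_negativos := by
  intro lista _
  unfold Spec_encontrar_intervalo_max_negativos
  simp only [encontrar_intervalo_max_negativos, encontrar_intervalo_max_negativos_alt]
  rw [bfold_char]
  set E := PySem.List.enumerate lista 0 with hE
  by_cases hn : (lista.length : Int) ≤ 0
  · have h0 : lista = [] := by
      cases lista with
      | nil => rfl
      | cons x xs => simp at hn; omega
    subst h0
    simp [PySem.List.pyRange_one_eq_nil, pvCnt]
  · rw [Int.not_le] at hn
    rw [PySem.List.pyRange_one_cons hn, List.foldl_cons]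
    rw [inner_eq_drop lista 0 le_rfl (by omega)]
    have hd0 : Int.toNat 0 = 0 := rfl
    rw [hd0, List.drop_zero, ← hE]
    rw [inner_char 0 E 0 0 0 0 le_rfl]
    simp only [zero_add]
    by_cases hC : 0 < pvCnt E
    · rw [if_pos hC, if_pos hC]
      have houter : (PySem.List.pyRange 1 (lista.length : Int) 1).foldl
          (fun st i => ((PySem.List.pyRange i (lista.length : Int) 1).foldl
            (fun (s : Int × Int × Int × Int) j =>
              let neg := if PySem.List.pyGetD lista j 0 < 0 then s.1 + 1 else s.1
              if neg > s.2.1 then (neg, neg, i, j) else (neg, s.2))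
            (0, st)).2) (pvCnt E, 0, pvLastNeg E) = (pvCnt E, 0, pvLastNeg E) := by
        have hcongr : ∀ (st : Int × Int × Int) (i : Int), i ∈ PySem.List.pyRange 1 (lista.length : Int) 1 →
            ((PySem.List.pyRange i (lista.length : Int) 1).foldl
              (fun (s : Int × Int × Int × Int) j =>
                let neg := if PySem.List.pyGetD lista j 0 < 0 then s.1 + 1 else s.1
                if neg > s.2.1 then (neg, neg, i, j) else (neg, s.2))
              (0, st)).2 = ((E.drop i.toNat).foldl (pvStep i) (0, st)).2 := by
          intro st i hi
          rw [PySem.List.mem_pyRange_one] at hi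
          rw [inner_eq_drop lista i (by omega) (by omega)]
        calc (PySem.List.pyRange 1 (lista.length : Int) 1).foldl
              (fun st i => ((PySem.List.pyRange i (lista.length : Int) 1).foldl
                (fun (s : Int × Int × Int × Int) j =>
                  let neg := if PySem.List.pyGetD lista j 0 < 0 then s.1 + 1 else s.1
                  if neg > s.2.1 then (neg, neg, i, j) else (neg, s.2))
                (0, st)).2) (pvCnt E, 0, pvLastNeg E)
            = (PySem.List.pyRange 1 (lista.length : Int) 1).foldl
              (fun st i => ((E.drop i.toNat).foldl (pvStep i) (0, st)).2) (pvCnt E, 0, pvLastNeg E) := by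
              apply PySem.List.foldl_congr_mem
              intro st i hi
              exact hcongr st i hi
          _ = (pvCnt E, 0, pvLastNeg E) := by
              apply outer_const E _ _ _ _ (by omega)
              intro i _
              exact pvCnt_drop_le E i.toNat
      rw [houter]
    · rw [if_neg hC, if_neg hC]
      have houter : (PySem.List.pyRange 1 (lista.length : Int) 1).foldl
          (fun st i => ((PySem.List.pyRange i (lista.length : Int) 1).foldl
            (fun (s : Int × Int × Int × Int) j =>
              let neg := if PySem.List.pyGetD lista j 0 < 0 then s.1 + 1 else s.1
              if neg > s.2.1 then (neg, neg, i, j) else (neg, s.2))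
            (0, st)).2) ((0 : Int), (0 : Int), (0 : Int)) = ((0 : Int), (0 : Int), (0 : Int)) := by
        have : (PySem.List.pyRange 1 (lista.length : Int) 1).foldl
              (fun st i => ((PySem.List.pyRange i (lista.length : Int) 1).foldl
                (fun (s : Int × Int × Int × Int) j =>
                  let neg := if PySem.List.pyGetD lista j 0 < 0 then s.1 + 1 else s.1
                  if neg > s.2.1 then (neg, neg, i, j) else (neg, s.2))
                (0, st)).2) ((0 : Int), (0 : Int), (0 : Int))
            = (PySem.List.pyRange 1 (lista.length : Int) 1).foldl
              (fun st i => ((E.drop i.toNat).foldl (pvStep i) (0, st)).2) ((0 : Int), (0 : Int), (0 : Int)) := by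
          apply PySem.List.foldl_congr_mem
          intro st i hi
          rw [PySem.List.mem_pyRange_one] at hi
          rw [inner_eq_drop lista i (by omega) (by omega)]
        rw [this]
        apply outer_const E _ _ _ _ le_rfl
        intro i _
        have := pvCnt_drop_le E i.toNat
        omega
      rw [houter]
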